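-- pv_equiv track=rewrite | github.com/franzoom/offline-liturgy | scripts/migrate_middle_of_day.py | update_antiphons_in_psalmody
-- ===== SOURCE A (Python) =====
-- def yaml_escape_inline(text):
--     """Escape a string for inline YAML if it contains special characters."""
--     if not text:
--         return '""'
--     # If contains colon followed by space, or starts with special chars, quote it
--     needs_quoting = any(
--         c in text for c in [":", "#", "{", "}", "[", "]", ",", "&", "*", "?", "|", ">"]
--     )
--     if needs_quoting or text.startswith(("'", '"', " ", "-")):
--         # Use double quotes with escaped inner quotes
--         escaped = text.replace("\\", "\\\\").replace('"', '\\"')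
--         return f'"{escaped}"'
--     return text
--
-- def update_antiphons_in_psalmody(lines, mod_start, mod_end, antiennes):
--     """Update antiphons in the existing psalmody section. Returns modified lines."""
--     if not antiennes:
--         return lines
--
--     # If z=0, all psalms get the same antiphon
--     all_same = 0 in antiennes
--     if all_same:
--         antiphon_text = antiennes[0]
--
--     # Find psalm entries in the psalmody section
--     psalm_index = 0
--     i = mod_start
--     new_lines = list(lines)
--     offset = 0
--
--     while i < mod_end + offset:
--         stripped = new_lines[i].strip()
--         if stripped.startswith("- psalm:"):
--             psalm_index += 1
--             # Check if next line(s) already have antiphon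
--             has_antiphon = False
--             j = i + 1
--             while j < mod_end + offset and new_lines[j].strip().startswith(("antiphon:", "-")):
--                 if new_lines[j].strip().startswith("antiphon:"):
--                     has_antiphon = True
--                     break
--                 if not new_lines[j].strip().startswith("-"):
--                     break
--                 j += 1
--
--             # Determine which antiphon to use
--             ant_text = None
--             if all_same:
--                 ant_text = antiphon_text
--             elif psalm_index in antiennes:
--                 ant_text = antiennes[psalm_index]
--
--             if ant_text and not has_antiphon:
--                 # Determine indentation from the psalm line
--                 indent = len(new_lines[i]) - len(new_lines[i].lstrip())
--                 ant_indent = " " * (indent + 2)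
--                 ant_lines = [
--                     f"{ant_indent}antiphon:",
--                     f"{ant_indent}  - {yaml_escape_inline(ant_text)}",
--                 ]
--                 # Insert after the psalm line
--                 for k, ant_line in enumerate(ant_lines):
--                     new_lines.insert(i + 1 + k, ant_line)
--                 offset += len(ant_lines)
--                 mod_end_adj = mod_end + len(ant_lines)
--                 i += len(ant_lines)
--         i += 1
--
--     return new_lines
-- ===== SOURCE B (Python) =====
-- def yaml_escape_inline(text):
--     """Escape a string for inline YAML if it contains special characters."""
--     if not text:
--         return '""'
--     needs_quoting = any(
--         c in text for c in [":", "#", "{", "}", "[", "]", ",", "&", "*", "?", "|", ">"]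
--     )
--     if needs_quoting or text.startswith(("'", '"', " ", "-")):
--         escaped = text.replace("\\", "\\\\").replace('"', '\\"')
--         return f'"{escaped}"'
--     return text
--
-- def update_antiphons_in_psalmody(lines, mod_start, mod_end, antiennes):
--     """Single pass over the original lines, appending to a fresh list; no in-place inserts."""
--     if not antiennes:
--         return lines
--     all_same = 0 in antiennes
--     out = []
--     psalm_index = 0
--     for idx, line in enumerate(lines):
--         out.append(line)
--         if not (mod_start <= idx < mod_end):
--             continue
--         stripped = line.strip()
--         if not stripped.startswith("- psalm:"):
--             continue
--         psalm_index += 1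
--         # look ahead in the ORIGINAL lines, up to the original mod_end
--         has_antiphon = False
--         for nxt in lines[idx + 1:mod_end]:
--             s = nxt.strip()
--             if s.startswith("antiphon:"):
--                 has_antiphon = True
--                 break
--             if not s.startswith("-"):
--                 break
--         if all_same:
--             ant_text = antiennes[0]
--         elif psalm_index in antiennes:
--             ant_text = antiennes[psalm_index]
--         else:
--             ant_text = None
--         if ant_text and not has_antiphon:
--             indent = len(line) - len(line.lstrip())
--             pad = " " * (indent + 2)
--             out.append(pad + "antiphon:")
--             out.append(pad + "  - " + yaml_escape_inline(ant_text))
--     return out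
-- ===== Notes on version B (the rewrite author's own statement) =====
-- stated objective: simpler
-- what changed: B builds the result in one pass by appending each original line (plus any missing antiphon lines) to a fresh output list, looking ahead in the original lines up to mod_end, instead of A's in-place list.insert surgery with offset/index bookkeeping over a mutated copy.
-- outside the precondition, e.g. on update_antiphons_in_psalmody(['a'], 0, 5, {0: 'x'}): A raises IndexError, B returns ['a']
import Mathlib
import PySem

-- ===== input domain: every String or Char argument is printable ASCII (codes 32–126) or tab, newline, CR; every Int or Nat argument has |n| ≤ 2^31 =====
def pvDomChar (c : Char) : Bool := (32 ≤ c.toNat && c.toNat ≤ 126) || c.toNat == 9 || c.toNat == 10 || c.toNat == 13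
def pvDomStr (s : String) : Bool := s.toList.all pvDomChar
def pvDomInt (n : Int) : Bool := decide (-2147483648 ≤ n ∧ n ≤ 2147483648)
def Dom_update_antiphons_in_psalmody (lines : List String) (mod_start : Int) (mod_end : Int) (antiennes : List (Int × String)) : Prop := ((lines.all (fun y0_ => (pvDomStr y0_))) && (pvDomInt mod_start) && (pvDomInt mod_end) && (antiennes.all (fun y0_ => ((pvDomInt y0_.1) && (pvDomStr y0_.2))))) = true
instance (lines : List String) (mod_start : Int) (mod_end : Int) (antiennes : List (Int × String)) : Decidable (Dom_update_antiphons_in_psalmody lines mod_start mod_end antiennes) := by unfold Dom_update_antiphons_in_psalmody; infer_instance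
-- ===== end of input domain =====

-- B replaces A's in-place list surgery (insert + offset/index bookkeeping) by a single pass that
-- appends to a fresh output list, looking ahead in the original lines; objective: simpler.


-- ===== PORT A =====

-- shared module helper yaml_escape_inline (identical source in Source A and Source B)
def pvEsc (text : String) : String :=
  if text = "" then "\"\""
  else
    if ([":", "#", "{", "}", "[", "]", ",", "&", "*", "?", "|", ">"] : List String).any
          (fun c => PySem.Str.isIn c text)
        || (PySem.Str.startswith text "'" || PySem.Str.startswith text "\"" ||
            PySem.Str.startswith text " " || PySem.Str.startswith text "-") then
      "\"" ++ PySem.Str.replace (PySem.Str.replace text "\\" "\\\\") "\"" "\\\"" ++ "\""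
    else text

-- A's inner 'while j < mod_end + offset …' look-ahead scan over new_lines
def pvALook (nl : List String) (j bound : Int) : Bool :=
  if _h : j < bound then
    match PySem.List.pyGet? nl j with
    | none => false  -- Python raises IndexError here; excluded by Pre_
    | some s =>
      if PySem.Str.startswith (PySem.Str.strip s) "antiphon:"
          || PySem.Str.startswith (PySem.Str.strip s) "-" then
        if PySem.Str.startswith (PySem.Str.strip s) "antiphon:" then true
        else if ¬ PySem.Str.startswith (PySem.Str.strip s) "-" then false
        else pvALook nl (j + 1) bound
      else false
  else false
termination_by (bound - j).toNat
decreasing_by omega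

-- A's outer 'while i < mod_end + offset' loop over new_lines, with the in-place inserts
def pvALoop (d : PySem.Dict Int String) (allSame : Bool) (me : Int)
    (nl : List String) (i : Int) (offset : Int) (pidx : Int) : List String :=
  if _h : i < me + offset then
    match PySem.List.pyGet? nl i with
    | none => nl  -- Python raises IndexError here; excluded by Pre_
    | some line =>
      if PySem.Str.startswith (PySem.Str.strip line) "- psalm:" then
        -- 'if all_same: ant_text = antiphon_text (= antiennes[0]) elif psalm_index in antiennes: …'
        match (if allSame then PySem.Dict.get? d 0 else PySem.Dict.get? d (pidx + 1)) with
        | some t =>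
          if t ≠ "" ∧ pvALook nl (i + 1) (me + offset) = false then  -- 'if ant_text and not has_antiphon'
            pvALoop d allSame me
              (PySem.List.insert
                (PySem.List.insert nl (i + 1)
                  (String.ofList (List.replicate ((PySem.Str.len line - PySem.Str.len (PySem.Str.lstrip line)) + 2).toNat ' ') ++ "antiphon:"))
                (i + 2)
                (String.ofList (List.replicate ((PySem.Str.len line - PySem.Str.len (PySem.Str.lstrip line)) + 2).toNat ' ') ++ "  - " ++ pvEsc t))
              (i + 3) (offset + 2) (pidx + 1)
          else pvALoop d allSame me nl (i + 1) offset (pidx + 1)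
        | none => pvALoop d allSame me nl (i + 1) offset (pidx + 1)
      else pvALoop d allSame me nl (i + 1) offset pidx
  else nl
termination_by (me + offset - i).toNat
decreasing_by all_goals omega

def update_antiphons_in_psalmody (lines : List String) (mod_start : Int) (mod_end : Int) (antiennes : List (Int × String)) : List String :=
  if antiennes = [] then lines
  else
    pvALoop (PySem.Dict.mk antiennes) (PySem.Dict.contains (PySem.Dict.mk antiennes) 0)
      mod_end lines mod_start 0 0

-- ===== PORT B =====

-- B's inner 'for nxt in lines[idx+1:mod_end]' look-ahead over the sliced original lines
def pvBLook : List String → Bool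
  | [] => false
  | nxt :: rest =>
    if PySem.Str.startswith (PySem.Str.strip nxt) "antiphon:" then true
    else if ¬ PySem.Str.startswith (PySem.Str.strip nxt) "-" then false
    else pvBLook rest

-- B's single 'for idx, line in enumerate(lines)' pass appending to out
def pvBLoop (lines : List String) (ms me : Int) (d : PySem.Dict Int String) (allSame : Bool) :
    List String → Int → Int → List String → List String
  | [], _, _, out => out
  | line :: rest, idx, pidx, out =>
    if ms ≤ idx ∧ idx < me then
      if PySem.Str.startswith (PySem.Str.strip line) "- psalm:" then
        match (if allSame then PySem.Dict.get? d 0 else PySem.Dict.get? d (pidx + 1)) with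
        | some t =>
          if t ≠ "" ∧ pvBLook (PySem.List.slice lines (some (idx + 1)) (some me)) = false then
            pvBLoop lines ms me d allSame rest (idx + 1) (pidx + 1)
              ((out ++ [line]) ++
                [String.ofList (List.replicate ((PySem.Str.len line - PySem.Str.len (PySem.Str.lstrip line)) + 2).toNat ' ') ++ "antiphon:",
                 String.ofList (List.replicate ((PySem.Str.len line - PySem.Str.len (PySem.Str.lstrip line)) + 2).toNat ' ') ++ "  - " ++ pvEsc t])
          else pvBLoop lines ms me d allSame rest (idx + 1) (pidx + 1) (out ++ [line])
        | none => pvBLoop lines ms me d allSame rest (idx + 1) (pidx + 1) (out ++ [line])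
      else pvBLoop lines ms me d allSame rest (idx + 1) pidx (out ++ [line])
    else pvBLoop lines ms me d allSame rest (idx + 1) pidx (out ++ [line])

def update_antiphons_in_psalmody_alt (lines : List String) (mod_start : Int) (mod_end : Int) (antiennes : List (Int × String)) : List String :=
  if antiennes = [] then lines
  else
    pvBLoop lines mod_start mod_end (PySem.Dict.mk antiennes)
      (PySem.Dict.contains (PySem.Dict.mk antiennes) 0) lines 0 0 []

-- ===== PRECONDITION & SPEC =====
-- Pre_ excludes (only when A's loop would actually run, i.e. antiennes ≠ {} and mod_start < mod_end)
-- windows reaching past the end of lines, where A raises IndexError, and negative mod_start, where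
-- A's wraparound traversal via Python negative indexing is an accident of its implementation;
-- B clamps the window to the list there.
def Pre_update_antiphons_in_psalmody (lines : List String) (mod_start : Int) (mod_end : Int) (antiennes : List (Int × String)) : Prop :=
  antiennes ≠ [] → mod_start < mod_end → (0 ≤ mod_start ∧ mod_end ≤ (lines.length : Int))
instance (lines : List String) (mod_start : Int) (mod_end : Int) (antiennes : List (Int × String)) : Decidable (Pre_update_antiphons_in_psalmody lines mod_start mod_end antiennes) := by unfold Pre_update_antiphons_in_psalmody; infer_instance

def pvWitness_update_antiphons_in_psalmody : List String × Int × Int × (List (Int × String)) :=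
  (["- psalm: 1", "  - foo"], 0, 2, [(0, "x")])

def Spec_update_antiphons_in_psalmody (lines : List String) (mod_start : Int) (mod_end : Int) (antiennes : List (Int × String)) (out : List String) : Prop := out = update_antiphons_in_psalmody_alt lines mod_start mod_end antiennes
instance (lines : List String) (mod_start : Int) (mod_end : Int) (antiennes : List (Int × String)) (out : List String) : Decidable (Spec_update_antiphons_in_psalmody lines mod_start mod_end antiennes out) := by unfold Spec_update_antiphons_in_psalmody; infer_instance

-- ===== CLAIM (what is proved, stated in full; the proofs are below) =====
def Claim_equal_update_antiphons_in_psalmody : Prop := ∀ (lines : List String) (mod_start : Int) (mod_end : Int) (antiennes : List (Int × String)), Dom_update_antiphons_in_psalmody lines mod_start mod_end antiennes → Pre_update_antiphons_in_psalmody lines mod_start mod_end antiennes → Spec_update_antiphons_in_psalmody lines mod_start mod_end antiennes (update_antiphons_in_psalmody lines mod_start mod_end antiennes)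

-- ===== LEMMAS AND PROOFS =====

-- B copies lines whose index lies outside [ms, me) unchanged
theorem pvBLoop_copy (lines : List String) (ms me : Int) (d : PySem.Dict Int String) (allSame : Bool)
    (seg : List String) :
    ∀ (rest : List String) (idx pidx : Int) (out : List String),
      (∀ k : Nat, k < seg.length → ¬ (ms ≤ idx + k ∧ idx + k < me)) →
      pvBLoop lines ms me d allSame (seg ++ rest) idx pidx out
        = pvBLoop lines ms me d allSame rest (idx + seg.length) pidx (out ++ seg) := by
  induction seg with
  | nil => intro rest idx pidx out _; simp
  | cons line t ih =>
    intro rest idx pidx out h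
    have h0 : ¬ (ms ≤ idx ∧ idx < me) := by
      have := h 0 (by simp)
      simpa using this
    rw [List.cons_append, pvBLoop, if_neg h0]
    rw [ih rest (idx + 1) pidx (out ++ [line]) (by
      intro k hk hcon
      have := h (k + 1) (by simpa using Nat.succ_lt_succ hk)
      exact this (by push_cast at hcon ⊢; constructor <;> omega))]
    rw [show idx + 1 + (t.length : Int) = idx + ((line :: t).length : Int) by
          push_cast [List.length_cons]; ring,
        show out ++ [line] ++ t = out ++ line :: t by simp]

-- A's look-ahead over new_lines equals B's look-ahead over the original window suffix
theorem pvALook_eq (k : Nat) :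
    ∀ (P R : List String), k ≤ R.length →
      pvALook (P ++ R) (P.length : Int) ((P.length : Int) + (k : Int)) = pvBLook (R.take k) := by
  induction k with
  | zero =>
    intro P R _
    rw [pvALook, dif_neg (by push_cast; omega)]
    simp [pvBLook]
  | succ k ih =>
    intro P R hk
    cases R with
    | nil => simp at hk
    | cons x R' =>
      have hrec : pvALook ((P ++ [x]) ++ R') (((P ++ [x]).length : Nat) : Int)
          ((((P ++ [x]).length : Nat) : Int) + (k : Int)) = pvBLook (R'.take k) :=
        ih (P ++ [x]) R' (by simpa using hk)
      rw [pvALook, dif_pos (by push_cast; omega), PySem.List.pyGet?_append_length]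
      dsimp only
      rw [show pvALook (P ++ x :: R') ((P.length : Int) + 1) ((P.length : Int) + ((k + 1 : Nat) : Int))
            = pvBLook (R'.take k) from by
          rw [show P ++ x :: R' = (P ++ [x]) ++ R' by simp,
              show ((P.length : Int) + 1) = (((P ++ [x]).length : Nat) : Int) by simp,
              show ((P.length : Int) + ((k + 1 : Nat) : Int)) = (((P ++ [x]).length : Nat) : Int) + (k : Int) by
                push_cast [List.length_append, List.length_cons, List.length_nil]; ring]
          exact hrec]
      simp only [List.take_succ_cons, pvBLook]
      cases h1 : PySem.Str.startswith (PySem.Str.strip x) "antiphon:" <;>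
        cases h2 : PySem.Str.startswith (PySem.Str.strip x) "-" <;> simp [h1, h2]

-- the two inserts after the psalm line rebuild the processed prefix
theorem pvInsert2_eq (P D : List String) (line l0 l1 : String) :
    PySem.List.insert (PySem.List.insert (P ++ line :: D) ((P.length : Int) + 1) l0)
        ((P.length : Int) + 2) l1
      = (P ++ [line, l0, l1]) ++ D := by
  rw [show P ++ line :: D = (P ++ [line]) ++ D by simp,
      show ((P.length : Int) + 1) = (((P ++ [line]).length : Nat) : Int) by simp,
      PySem.List.insert_natCast _ _ _ (by simp),
      List.take_left, List.drop_left,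
      show (P ++ [line]) ++ l0 :: D = (((P ++ [line]) ++ [l0])) ++ D by simp,
      show ((P.length : Int) + 2) = ((((P ++ [line]) ++ [l0]).length : Nat) : Int) by
        simp only [List.length_append, List.length_cons, List.length_nil]; push_cast; ring,
      PySem.List.insert_natCast _ _ _ (by simp),
      List.take_left, List.drop_left]
  simp

-- the window: A's offset-adjusted in-place loop = B's append-only pass, from original index c on
theorem pvWindow (lines : List String) (ms me : Int) (d : PySem.Dict Int String) (allSame : Bool)
    (hms : 0 ≤ ms) (hme : me ≤ (lines.length : Int)) (k : Nat) :
    ∀ (c : Nat) (pidx : Int) (P : List String),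
      me - (c : Int) ≤ (k : Int) → ms ≤ (c : Int) → (c : Int) ≤ me →
      pvALoop d allSame me (P ++ lines.drop c) (P.length : Int) ((P.length : Int) - (c : Int)) pidx
        = pvBLoop lines ms me d allSame (lines.drop c) (c : Int) pidx P := by
  induction k with
  | zero =>
    intro c pidx P hk hlo hhi
    have hcopy := pvBLoop_copy lines ms me d allSame (lines.drop c) [] c pidx P
      (by intro j hj hcon; omega)
    simp only [pvBLoop, List.append_nil, List.nil_append] at hcopy
    rw [pvALoop, dif_neg (by omega), hcopy]
  | succ k ih =>
    intro c pidx P hk hlo hhi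
    by_cases hcme : (c : Int) = me
    · have hcopy := pvBLoop_copy lines ms me d allSame (lines.drop c) [] c pidx P
        (by intro j hj hcon; omega)
      simp only [pvBLoop, List.append_nil, List.nil_append] at hcopy
      rw [pvALoop, dif_neg (by omega), hcopy]
    · have hclt : (c : Int) < me := lt_of_le_of_ne hhi hcme
      have hcn : c < lines.length := by exact_mod_cast lt_of_lt_of_le hclt hme
      set line := lines[c] with hline
      set D := lines.drop (c + 1) with hD
      have hdrop : lines.drop c = line :: D := by
        rw [hD, hline]; exact List.drop_eq_getElem_cons hcn
      have hstep : ∀ q : Int,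
          pvALoop d allSame me (P ++ line :: D) ((P.length : Int) + 1) ((P.length : Int) - (c : Int)) q
            = pvBLoop lines ms me d allSame D ((c : Int) + 1) q (P ++ [line]) := by
        intro q
        have key := ih (c + 1) q (P ++ [line]) (by push_cast; omega) (by push_cast; omega)
          (by push_cast; omega)
        rw [← hD] at key
        rw [show P ++ line :: D = (P ++ [line]) ++ D by simp,
            show ((P.length : Int) + 1) = (((P ++ [line]).length : Nat) : Int) by simp,
            show ((P.length : Int) - (c : Int)) = (((P ++ [line]).length : Nat) : Int) - ((c + 1 : Nat) : Int) by
              push_cast [List.length_append, List.length_cons, List.length_nil]; ring,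
            show ((c : Int) + 1) = ((c + 1 : Nat) : Int) by push_cast; ring]
        exact key
      rw [hdrop, pvALoop,
        dif_pos (show (P.length : Int) < me + ((P.length : Int) - (c : Int)) by omega),
        PySem.List.pyGet?_append_length]
      dsimp only
      rw [pvBLoop, if_pos (⟨hlo, hclt⟩ : ms ≤ (c : Int) ∧ (c : Int) < me)]
      by_cases hps : PySem.Str.startswith (PySem.Str.strip line) "- psalm:" = true
      · rw [if_pos hps, if_pos hps]
        have hklen : (me - ((c : Int) + 1)).toNat ≤ D.length := by
          rw [hD, List.length_drop]
          omega
        have hlook : pvALook (P ++ line :: D) ((P.length : Int) + 1) (me + ((P.length : Int) - (c : Int)))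
            = pvBLook (PySem.List.slice lines (some ((c : Int) + 1)) (some me)) := by
          rw [show P ++ line :: D = (P ++ [line]) ++ D by simp,
              show ((P.length : Int) + 1) = (((P ++ [line]).length : Nat) : Int) by simp,
              show me + ((P.length : Int) - (c : Int))
                = (((P ++ [line]).length : Nat) : Int) + (((me - ((c : Int) + 1)).toNat : Nat) : Int) by
                simp only [List.length_append, List.length_cons, List.length_nil]; push_cast; omega]
          rw [pvALook_eq _ _ _ hklen]
          rw [PySem.List.slice_toNat _ (by omega) (by omega)]
          rw [show ((c : Int) + 1).toNat = c + 1 by omega, ← hD,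
              show (me - ((c : Int) + 1)).toNat = me.toNat - (c + 1) by omega]
        rw [hlook]
        cases hat : (if allSame then PySem.Dict.get? d 0 else PySem.Dict.get? d (pidx + 1)) with
        | none => exact hstep (pidx + 1)
        | some t =>
          dsimp only
          by_cases hcond : (t ≠ "" ∧ pvBLook (PySem.List.slice lines (some ((c : Int) + 1)) (some me)) = false)
          · rw [if_pos hcond, if_pos hcond, pvInsert2_eq]
            have key := ih (c + 1) (pidx + 1)
              (P ++ [line,
                String.ofList (List.replicate ((PySem.Str.len line - PySem.Str.len (PySem.Str.lstrip line)) + 2).toNat ' ') ++ "antiphon:",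
                String.ofList (List.replicate ((PySem.Str.len line - PySem.Str.len (PySem.Str.lstrip line)) + 2).toNat ' ') ++ "  - " ++ pvEsc t])
              (by push_cast; omega) (by push_cast; omega) (by push_cast; omega)
            rw [← hD] at key
            rw [show ((P.length : Int) + 3)
                  = (((P ++ [line,
                      String.ofList (List.replicate ((PySem.Str.len line - PySem.Str.len (PySem.Str.lstrip line)) + 2).toNat ' ') ++ "antiphon:",
                      String.ofList (List.replicate ((PySem.Str.len line - PySem.Str.len (PySem.Str.lstrip line)) + 2).toNat ' ') ++ "  - " ++ pvEsc t]).length : Nat) : Int) by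
                  simp only [List.length_append, List.length_cons, List.length_nil]; push_cast; ring,
                show ((P.length : Int) - (c : Int) + 2)
                  = (((P ++ [line,
                      String.ofList (List.replicate ((PySem.Str.len line - PySem.Str.len (PySem.Str.lstrip line)) + 2).toNat ' ') ++ "antiphon:",
                      String.ofList (List.replicate ((PySem.Str.len line - PySem.Str.len (PySem.Str.lstrip line)) + 2).toNat ' ') ++ "  - " ++ pvEsc t]).length : Nat) : Int) - ((c + 1 : Nat) : Int) by
                  simp only [List.length_append, List.length_cons, List.length_nil]; push_cast; ring,
                show ((c : Int) + 1) = ((c + 1 : Nat) : Int) by push_cast; ring,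
                show (P ++ [line]) ++
                    [String.ofList (List.replicate ((PySem.Str.len line - PySem.Str.len (PySem.Str.lstrip line)) + 2).toNat ' ') ++ "antiphon:",
                     String.ofList (List.replicate ((PySem.Str.len line - PySem.Str.len (PySem.Str.lstrip line)) + 2).toNat ' ') ++ "  - " ++ pvEsc t]
                  = P ++ [line,
                      String.ofList (List.replicate ((PySem.Str.len line - PySem.Str.len (PySem.Str.lstrip line)) + 2).toNat ' ') ++ "antiphon:",
                      String.ofList (List.replicate ((PySem.Str.len line - PySem.Str.len (PySem.Str.lstrip line)) + 2).toNat ' ') ++ "  - " ++ pvEsc t] by simp]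
            exact key
          · rw [if_neg hcond, if_neg hcond]
            exact hstep (pidx + 1)
      · rw [if_neg hps, if_neg hps]
        exact hstep pidx

-- ===== VERDICT (by name: the statement is the Claim_ definition above) =====
theorem update_antiphons_in_psalmody_spec : Claim_equal_update_antiphons_in_psalmody := by
  intro lines ms me ant _hdom hpre
  unfold Spec_update_antiphons_in_psalmody update_antiphons_in_psalmody update_antiphons_in_psalmody_alt
  by_cases hempty : ant = []
  · simp [hempty]
  · simp only [hempty, if_false]
    by_cases hrun : ms < me
    · obtain ⟨hms, hme⟩ := hpre hempty hrun
      have htake : (List.take ms.toNat lines).length = ms.toNat := by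
        rw [List.length_take]; omega
      have hnat : ((ms.toNat : Nat) : Int) = ms := by omega
      have hwin := pvWindow lines ms me (PySem.Dict.mk ant)
        (PySem.Dict.contains (PySem.Dict.mk ant) 0) hms hme me.toNat ms.toNat 0
        (List.take ms.toNat lines) (by omega) (by omega) (by omega)
      rw [List.take_append_drop, htake, hnat, sub_self] at hwin
      have hcopy := pvBLoop_copy lines ms me (PySem.Dict.mk ant)
        (PySem.Dict.contains (PySem.Dict.mk ant) 0)
        (List.take ms.toNat lines) (lines.drop ms.toNat) 0 0 []
        (by intro j hj hcon; rw [htake] at hj; omega)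
      rw [List.take_append_drop, htake, hnat] at hcopy
      simp only [List.nil_append, zero_add] at hcopy
      rw [hwin]
      exact hcopy.symm
    · have hcopy := pvBLoop_copy lines ms me (PySem.Dict.mk ant)
        (PySem.Dict.contains (PySem.Dict.mk ant) 0) lines [] 0 0 []
        (by intro j hj hcon; omega)
      simp only [pvBLoop, List.append_nil, List.nil_append] at hcopy
      rw [pvALoop, dif_neg (by omega)]
      exact hcopy.symm
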